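-- pv_equiv track=rewrite | github.com/RideMatch1/qubic-church | apps/web/scripts/anna_binary_message_decoder.py | extract_readable_sequences
-- ===== SOURCE A (Python) =====
-- from typing import List, Dict, Any, Tuple
--
-- def extract_readable_sequences(text: str, min_length: int = 4) -> List[str]:
--     """Extract sequences of readable characters."""
--     sequences = []
--     current = ""
--     for char in text:
--         if char != '.':
--             current += char
--         else:
--             if len(current) >= min_length:
--                 sequences.append(current)
--             current = ""
--     if len(current) >= min_length:
--         sequences.append(current)
--     return sequences
-- ===== SOURCE B (Python) =====
-- def extract_readable_sequences(text: str, min_length: int = 4) -> list: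
--     """Extract sequences of readable characters."""
--     return [seg for seg in text.split('.') if len(seg) >= min_length]
-- ===== Notes on version B (the rewrite author's own statement) =====
-- stated objective: idiomatic
-- what changed: Replaces the manual char-by-char accumulator loop (buffer plus end-of-string flush) with a single str.split on the dot separator followed by a length filter over the segments.
import Mathlib
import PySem

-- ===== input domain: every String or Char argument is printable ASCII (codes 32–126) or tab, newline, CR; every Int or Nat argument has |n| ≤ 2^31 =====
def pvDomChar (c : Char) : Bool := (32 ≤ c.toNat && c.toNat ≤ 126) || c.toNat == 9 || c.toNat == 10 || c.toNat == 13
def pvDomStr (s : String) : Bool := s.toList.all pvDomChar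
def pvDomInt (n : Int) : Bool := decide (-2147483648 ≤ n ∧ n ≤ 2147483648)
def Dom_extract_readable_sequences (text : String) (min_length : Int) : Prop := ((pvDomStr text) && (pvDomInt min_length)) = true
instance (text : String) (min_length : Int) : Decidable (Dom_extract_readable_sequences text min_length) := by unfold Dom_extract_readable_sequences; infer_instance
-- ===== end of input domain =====

-- B replaces A's char-by-char accumulator loop by split-on-dot + a length filter (idiomatic; same O(n) cost).


-- ===== PORT A =====
-- loop body: `if char != '.': current += char  else: flush current if long enough`
def pvStepA (m : Int) (st : List String × List Char) (c : Char) : List String × List Char :=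
  if c ≠ '.' then (st.1, st.2 ++ [c])
  else (if m ≤ (st.2.length : Int) then st.1 ++ [String.ofList st.2] else st.1, [])

-- end-of-string flush: `if len(current) >= min_length: sequences.append(current)`
def pvFlushA (m : Int) (st : List String × List Char) : List String :=
  if m ≤ (st.2.length : Int) then st.1 ++ [String.ofList st.2] else st.1

def extract_readable_sequences (text : String) (min_length : Int) : List String :=
  pvFlushA min_length (text.toList.foldl (pvStepA min_length) ([], []))

-- ===== PORT B =====
-- text.split('.') via PySem.Chars.splitOn (exact Python split for a nonempty separator), then a length filter
def extract_readable_sequences_alt (text : String) (min_length : Int) : List String :=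
  let segments := PySem.Chars.splitOn text.toList ['.']
  (segments.filter (fun seg => min_length ≤ (seg.length : Int))).map String.ofList

-- ===== PRECONDITION & SPEC =====
def Spec_extract_readable_sequences (text : String) (min_length : Int) (out : List String) : Prop := out = extract_readable_sequences_alt text min_length
instance (text : String) (min_length : Int) (out : List String) : Decidable (Spec_extract_readable_sequences text min_length out) := by unfold Spec_extract_readable_sequences; infer_instance

-- ===== CLAIM (what is proved, stated in full; the proofs are below) =====
def Claim_equal_extract_readable_sequences : Prop := ∀ (text : String) (min_length : Int), Dom_extract_readable_sequences text min_length → Spec_extract_readable_sequences text min_length (extract_readable_sequences text min_length)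

-- ===== LEMMAS AND PROOFS =====

-- simple recursive characterisation of splitting on '.'
def pvSplitDot : List Char → List (List Char)
  | [] => [[]]
  | c :: rest =>
    if c = '.' then [] :: pvSplitDot rest
    else match pvSplitDot rest with
      | [] => [[c]]
      | s :: ss => (c :: s) :: ss

-- apply f to the head segment only
def pvMapHead (f : List Char → List Char) : List (List Char) → List (List Char)
  | [] => []
  | s :: ss => f s :: ss

theorem pvSplitDot_ne_nil (l : List Char) : pvSplitDot l ≠ [] := by
  cases l with
  | nil => simp [pvSplitDot]
  | cons c rest =>
    simp only [pvSplitDot]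
    split_ifs
    · simp
    · cases h : pvSplitDot rest <;> simp

theorem pvMapHead_id (xs : List (List Char)) : pvMapHead (fun s => s) xs = xs := by
  cases xs <;> simp [pvMapHead]

theorem pvSplitOn_go_dot (l : List Char) : ∀ (fuel : Nat) (cur : List Char) (acc : List (List Char)),
    l.length ≤ fuel →
    PySem.Chars.splitOn.go ['.'] fuel l cur acc
      = acc.reverse ++ pvMapHead (fun s => cur.reverse ++ s) (pvSplitDot l) := by
  induction l with
  | nil =>
    intro fuel cur acc _
    cases fuel <;> simp [PySem.Chars.splitOn.go, pvSplitDot, pvMapHead]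
  | cons c rest ih =>
    intro fuel cur acc hf
    cases fuel with
    | zero => simp at hf
    | succ f =>
      simp only [List.length_cons, Nat.succ_le_succ_iff] at hf
      by_cases hc : c = '.'
      · subst hc
        have hpre : List.isPrefixOf ['.'] ('.' :: rest) = true := by
          simp [List.isPrefixOf]
        rw [PySem.Chars.splitOn.go]
        simp only [hpre, if_true, List.length_cons, List.length_nil, List.drop_succ_cons,
          List.drop_zero]
        rw [ih f [] (List.reverse cur :: acc) hf]
        have hmh : pvMapHead (fun s => List.reverse ([] : List Char) ++ s) (pvSplitDot rest)
            = pvSplitDot rest := by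
          have := pvMapHead_id (pvSplitDot rest); simpa using this
        rw [hmh]
        simp [pvSplitDot, pvMapHead]
      · have hpre : List.isPrefixOf ['.'] (c :: rest) = false := by
          simp [List.isPrefixOf]
          intro h; exact hc h.symm
        rw [PySem.Chars.splitOn.go]
        simp only [hpre, Bool.false_eq_true, if_false]
        rw [ih f (c :: cur) acc hf]
        have hne := pvSplitDot_ne_nil rest
        cases hsd : pvSplitDot rest with
        | nil => exact absurd hsd hne
        | cons s ss =>
          simp [pvSplitDot, hc, hsd, pvMapHead]

theorem pvSplitOn_dot (l : List Char) :
    PySem.Chars.splitOn l ['.'] = pvSplitDot l := by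
  unfold PySem.Chars.splitOn
  rw [pvSplitOn_go_dot l (l.length + 1) [] [] (by omega)]
  simp [pvMapHead_id]

-- A's loop, flushed at the end, = length filter over pvSplitDot with the pending buffer prepended
theorem pvFold_eq (m : Int) (l : List Char) : ∀ (seqs : List String) (cur : List Char),
    pvFlushA m (l.foldl (pvStepA m) (seqs, cur))
      = seqs ++ ((pvMapHead (fun s => cur ++ s) (pvSplitDot l)).filter
          (fun seg => m ≤ (seg.length : Int))).map String.ofList := by
  induction l with
  | nil =>
    intro seqs cur
    by_cases h : m ≤ (cur.length : Int) <;>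
      simp [pvFlushA, pvSplitDot, pvMapHead, List.filter, h]
  | cons c rest ih =>
    intro seqs cur
    rw [List.foldl_cons]
    by_cases hc : c = '.'
    · subst hc
      have hstep : pvStepA m (seqs, cur) '.'
          = (if m ≤ (cur.length : Int) then seqs ++ [String.ofList cur] else seqs, []) := by
        simp [pvStepA]
      rw [hstep, ih]
      have hmh : pvMapHead (fun s => [] ++ s) (pvSplitDot rest) = pvSplitDot rest := by
        simp only [List.nil_append]; exact pvMapHead_id _
      rw [hmh]
      by_cases h : m ≤ (cur.length : Int) <;>
        simp [h, pvSplitDot, pvMapHead, List.filter_cons, List.append_assoc]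
    · have hstep : pvStepA m (seqs, cur) c = (seqs, cur ++ [c]) := by
        simp [pvStepA, hc]
      rw [hstep, ih]
      have hne := pvSplitDot_ne_nil rest
      cases hsd : pvSplitDot rest with
      | nil => exact absurd hsd hne
      | cons s ss =>
        have h2 : pvMapHead (fun t => cur ++ t) (pvSplitDot (c :: rest))
            = (cur ++ c :: s) :: ss := by
          simp [pvSplitDot, hc, hsd, pvMapHead]
        rw [h2]
        simp [pvMapHead, List.append_assoc]

-- ===== VERDICT (by name: the statement is the Claim_ definition above) =====
theorem extract_readable_sequences_spec : Claim_equal_extract_readable_sequences := by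
  intro text min_length _
  unfold Spec_extract_readable_sequences extract_readable_sequences extract_readable_sequences_alt
  rw [pvSplitOn_dot]
  have h := pvFold_eq min_length text.toList [] []
  simpa [pvMapHead_id] using h
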